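-- pv_equiv track=rewrite | github.com/artemys/Partition-wiwiwi | server/pipeline.py | parse_tuning
-- ===== SOURCE A (Python) =====
-- from typing import Any, Callable, Dict, Iterable, List, Optional, Tuple
--
-- def parse_tuning(tuning: str, capo: int) -> Tuple[List[int], Optional[str]]:
--     standard = [40, 45, 50, 55, 59, 64]  # E2 A2 D3 G3 B3 E4
--     tuning = (tuning or "").strip().upper()
--     if tuning == "EADGBE":
--         return [p + capo for p in standard], None
--     note_map = {"C": 0, "D": 2, "E": 4, "F": 5, "G": 7, "A": 9, "B": 11}
--     notes: List[str] = []
--     idx = 0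
--     while idx < len(tuning):
--         char = tuning[idx]
--         if char not in note_map:
--             return [p + capo for p in standard], "Tuning invalide, retour à EADGBE."
--         if idx + 1 < len(tuning) and tuning[idx + 1] in ("#", "B"):
--             notes.append(char + tuning[idx + 1])
--             idx += 2
--         else:
--             notes.append(char)
--             idx += 1
--     if len(notes) != 6:
--         return [p + capo for p in standard], "Tuning invalide, retour à EADGBE."
--     octaves = [2, 2, 3, 3, 3, 4]
--     midi: List[int] = []
--     for note, octave in zip(notes, octaves):
--         semitone = note_map[note[0]]
--         if len(note) == 2 and note[1] == "#":
--             semitone += 1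
--         elif len(note) == 2 and note[1] == "B":
--             semitone -= 1
--         midi.append((octave + 1) * 12 + semitone + capo)
--     return midi, None
-- ===== SOURCE B (Python) =====
-- def parse_tuning(tuning, capo):
--     standard = [40, 45, 50, 55, 59, 64]
--     t = (tuning or "").strip().upper()
--     if t == "EADGBE":
--         return [p + capo for p in standard], None
--     semis = {"C": 0, "D": 2, "E": 4, "F": 5, "G": 7, "A": 9, "B": 11}
--     # one-pass state machine: 'pending' holds the semitone of a letter that may
--     # still receive an accidental; semitone values are produced directly
--     vals = []
--     pending = None
--     ok = True
--     for ch in t: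
--         if pending is not None:
--             if ch == "#":
--                 vals.append(pending + 1)
--                 pending = None
--                 continue
--             if ch == "B":
--                 vals.append(pending - 1)
--                 pending = None
--                 continue
--             vals.append(pending)
--             pending = None
--         if ch not in semis:
--             ok = False
--             break
--         pending = semis[ch]
--     if pending is not None:
--         vals.append(pending)
--     if not ok or len(vals) != 6:
--         return [p + capo for p in standard], "Tuning invalide, retour à EADGBE."
--     return [(o + 1) * 12 + v + capo for v, o in zip(vals, [2, 2, 3, 3, 3, 4])], None
-- ===== Notes on version B (the rewrite author's own statement) =====
-- stated objective: alternative
-- what changed: Replaced A's index-based while-loop that collects string tokens plus a second zip loop mapping tokens to MIDI with a single-pass state machine (pending-accidental carry) that produces semitone values directly, with no intermediate token list.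
import Mathlib
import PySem

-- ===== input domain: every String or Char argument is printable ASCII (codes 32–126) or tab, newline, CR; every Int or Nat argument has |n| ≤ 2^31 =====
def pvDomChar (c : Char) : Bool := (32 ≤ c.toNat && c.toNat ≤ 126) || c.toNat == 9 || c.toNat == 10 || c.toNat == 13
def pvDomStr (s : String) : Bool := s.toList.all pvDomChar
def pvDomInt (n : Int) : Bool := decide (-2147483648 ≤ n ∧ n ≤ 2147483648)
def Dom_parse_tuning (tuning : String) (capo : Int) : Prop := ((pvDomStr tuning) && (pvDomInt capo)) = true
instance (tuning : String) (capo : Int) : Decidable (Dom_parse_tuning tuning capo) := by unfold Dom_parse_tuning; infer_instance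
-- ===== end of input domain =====

-- B replaces A's index while-loop (string tokens) + second zip loop with a one-pass
-- state machine producing semitone values directly (a timing run measured B faster).


-- ===== PORT A =====
-- note_map of A
def pvNoteMapA : PySem.Dict Char Int :=
  PySem.Dict.ofList [('C', 0), ('D', 2), ('E', 4), ('F', 5), ('G', 7), ('A', 9), ('B', 11)]

-- A's while-loop over idx: consumes one or two chars per step (the early 'return' on an
-- invalid char becomes the 'none' result); tokens are built as strings, as in A.
def pvLoopA : List Char → Option (List String)
  | [] => some []
  | [c] =>
    if pvNoteMapA.contains c = false then none
    else some [String.ofList [c]]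
  | c :: c2 :: rest2 =>
    if pvNoteMapA.contains c = false then none
    else if c2 = '#' ∨ c2 = 'B' then
      (pvLoopA rest2).map (fun ns => String.ofList [c, c2] :: ns)
    else
      (pvLoopA (c2 :: rest2)).map (fun ns => String.ofList [c] :: ns)

-- body of A's second loop: note_map[note[0]] (KeyError unreachable: every token's head
-- is a key of note_map) then the '#'/'B' adjustment, reading note[0]/note[1] via toList
def pvSemitoneA (note : String) : Int :=
  match note.toList with
  | [c] => (pvNoteMapA.get? c).getD 0
  | [c, a] => (pvNoteMapA.get? c).getD 0 + (if a = '#' then 1 else if a = 'B' then -1 else 0)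
  | _ => 0

def parse_tuning (tuning : String) (capo : Int) : List Int × Option String :=
  let standard : List Int := [40, 45, 50, 55, 59, 64]
  -- '(tuning or "")' is the identity on strings
  let t := PySem.Str.upper (PySem.Str.strip tuning)
  if t = "EADGBE" then (standard.map (· + capo), none)
  else
    match pvLoopA t.toList with
    | none => (standard.map (· + capo), some "Tuning invalide, retour à EADGBE.")
    | some notes =>
      if notes.length ≠ 6 then (standard.map (· + capo), some "Tuning invalide, retour à EADGBE.")
      else
        ((notes.zip [2, 2, 3, 3, 3, 4]).map
          (fun p => (p.2 + 1) * 12 + pvSemitoneA p.1 + capo), none)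

-- ===== PORT B =====
-- semis of B
def pvSemisB : PySem.Dict Char Int :=
  PySem.Dict.ofList [('C', 0), ('D', 2), ('E', 4), ('F', 5), ('G', 7), ('A', 9), ('B', 11)]

-- B's loop body: state = none once 'ok' went False (the loop then does nothing more,
-- like Python's break); otherwise (vals so far, pending letter's semitone)
def pvStepB (st : Option (List Int × Option Int)) (ch : Char) : Option (List Int × Option Int) :=
  match st with
  | none => none
  | some (vals, pending) =>
    match pending with
    | some p =>
      if ch = '#' then some (vals ++ [p + 1], none)
      else if ch = 'B' then some (vals ++ [p - 1], none)
      else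
        match pvSemisB.get? ch with
        | none => none
        | some v => some (vals ++ [p], some v)
    | none =>
      match pvSemisB.get? ch with
      | none => none
      | some v => some (vals, some v)

-- B's post-loop 'if pending is not None: vals.append(pending)' plus the ok flag (none)
def pvFinishB : Option (List Int × Option Int) → Option (List Int)
  | none => none
  | some (vs, p) => some (vs ++ p.toList)

def parse_tuning_alt (tuning : String) (capo : Int) : List Int × Option String :=
  let standard : List Int := [40, 45, 50, 55, 59, 64]
  let t := PySem.Str.upper (PySem.Str.strip tuning)
  if t = "EADGBE" then (standard.map (· + capo), none)
  else
    match pvFinishB (t.toList.foldl pvStepB (some ([], none))) with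
    | none => (standard.map (· + capo), some "Tuning invalide, retour à EADGBE.")
    | some vals =>
      if vals.length = 6 then
        ((vals.zip [2, 2, 3, 3, 3, 4]).map (fun p => (p.2 + 1) * 12 + p.1 + capo), none)
      else (standard.map (· + capo), some "Tuning invalide, retour à EADGBE.")

-- ===== PRECONDITION & SPEC =====
def Spec_parse_tuning (tuning : String) (capo : Int) (out : List Int × Option String) : Prop := out = parse_tuning_alt tuning capo
instance (tuning : String) (capo : Int) (out : List Int × Option String) : Decidable (Spec_parse_tuning tuning capo out) := by unfold Spec_parse_tuning; infer_instance

-- ===== CLAIM (what is proved, stated in full; the proofs are below) =====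
def Claim_equal_parse_tuning : Prop := ∀ (tuning : String) (capo : Int), Dom_parse_tuning tuning capo → Spec_parse_tuning tuning capo (parse_tuning tuning capo)

-- ===== LEMMAS AND PROOFS =====

theorem pv_any_eq_find_isSome {α : Type} (p : α → Bool) (l : List α) :
    l.any p = (l.find? p).isSome := by
  induction l with
  | nil => rfl
  | cons x xs ih => by_cases hx : p x <;> simp [hx, ih]

-- contains and get? of A's literal note map agree
theorem pv_contains_get (c : Char) :
    pvNoteMapA.contains c = (pvNoteMapA.get? c).isSome := by
  simp [PySem.Dict.contains, PySem.Dict.get?, pv_any_eq_find_isSome]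

-- the error state is absorbing
theorem pv_foldl_stepB_none (cs : List Char) : cs.foldl pvStepB none = none := by
  induction cs with
  | nil => rfl
  | cons c cs ih => simpa [pvStepB] using ih

-- flushing a pending letter before a non-accidental char commutes with the step
theorem pv_stepB_pending (vals : List Int) (v : Int) (c : Char)
    (h1 : ¬ c = '#') (h2 : ¬ c = 'B') :
    pvStepB (some (vals, some v)) c = pvStepB (some (vals ++ [v], none)) c := by
  simp [pvStepB, h1, h2]

-- B's state machine produces exactly A's tokens mapped through A's semitone computation
theorem pvFold_eq_loopA (cs : List Char) : ∀ (vals0 : List Int),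
    pvFinishB (cs.foldl pvStepB (some (vals0, none)))
      = (pvLoopA cs).map (fun ns => vals0 ++ ns.map pvSemitoneA) := by
  have hsb : ∀ c, pvSemisB.get? c = pvNoteMapA.get? c := fun _ => rfl
  induction cs using pvLoopA.induct with
  | case1 => intro vals0; simp [pvLoopA, pvFinishB]
  | case2 c h =>
      intro vals0
      rcases hv : pvNoteMapA.get? c with _ | v
      · simp [pvStepB, pvFinishB, pvLoopA, hsb, hv, h]
      · rw [pv_contains_get, hv] at h; simp at h
  | case3 c h =>
      intro vals0
      rcases hv : pvNoteMapA.get? c with _ | v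
      · rw [pv_contains_get, hv] at h; simp at h
      · simp [pvStepB, pvFinishB, pvLoopA, pvSemitoneA, hsb, hv, h]
  | case4 c c2 rest2 h =>
      intro vals0
      rcases hv : pvNoteMapA.get? c with _ | v
      · simp [pvStepB, pvLoopA, hsb, hv, h, pv_foldl_stepB_none, pvFinishB]
      · rw [pv_contains_get, hv] at h; simp at h
  | case5 c c2 rest2 h hacc ih =>
      intro vals0
      simp only [Bool.not_eq_false] at h
      rcases hv : pvNoteMapA.get? c with _ | v
      · rw [pv_contains_get, hv] at h; simp at h
      · have h1 : pvStepB (some (vals0, none)) c = some (vals0, some v) := by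
          simp [pvStepB, hsb, hv]
        rcases hacc with rfl | rfl
        · have h2 : pvStepB (some (vals0, some v)) '#' = some (vals0 ++ [v + 1], none) := rfl
          rw [List.foldl_cons, List.foldl_cons, h1, h2, ih]
          cases hL : pvLoopA rest2 <;> simp [pvLoopA, pvSemitoneA, hv, h, hL]
        · have h2 : pvStepB (some (vals0, some v)) 'B' = some (vals0 ++ [v - 1], none) := rfl
          rw [List.foldl_cons, List.foldl_cons, h1, h2, ih]
          cases hL : pvLoopA rest2 <;> simp [pvLoopA, pvSemitoneA, hv, h, hL, sub_eq_add_neg]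
  | case6 c c2 rest2 h hacc ih =>
      intro vals0
      simp only [Bool.not_eq_false] at h
      rw [not_or] at hacc
      rcases hv : pvNoteMapA.get? c with _ | v
      · rw [pv_contains_get, hv] at h; simp at h
      · have h1 : pvStepB (some (vals0, none)) c = some (vals0, some v) := by
          simp [pvStepB, hsb, hv]
        rw [List.foldl_cons, List.foldl_cons, h1,
          pv_stepB_pending _ _ _ hacc.1 hacc.2, ← List.foldl_cons, ih]
        cases hL : pvLoopA (c2 :: rest2) <;>
          simp [pvLoopA, pvSemitoneA, hv, h, hL, hacc.1, hacc.2]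

theorem parse_tuning_spec : Claim_equal_parse_tuning := by
  unfold Claim_equal_parse_tuning
  intro tuning capo _
  unfold Spec_parse_tuning parse_tuning parse_tuning_alt
  by_cases hE : PySem.Str.upper (PySem.Str.strip tuning) = "EADGBE"
  · simp [hE]
  · simp only [hE, pvFold_eq_loopA]
    rcases hL : pvLoopA (PySem.Str.upper (PySem.Str.strip tuning)).toList with _ | notes
    · simp
    · by_cases h6 : notes.length = 6
      · simp [h6, List.zip_map_left, List.map_map, Function.comp, Prod.map]
      · simp [h6]
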